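-- pv_equiv track=rewrite | github.com/aulloa/Morse_Translator_Bot | translate_morse_input.py | wordparse
-- ===== SOURCE A (Python) =====
-- def underscore (morse_input):
--     "finds indexes of underscores in string which speperate words of morse "
--     x = 0
--     i_arry = []
--     while True:
--         i = morse_input.find ('_', x)
-- #        print (i)
--         x = i+1
--         i_arry.append (i)
--         if i == -1:
--             break
--     return i_arry
--
-- def wordparse (morse_input):
--     "parses morse input into morse strings"
--     w         = underscore(morse_input)
--     if w[0] == -1:
--         morse_strings = [morse_input]
--         print ("single word")
--     else:
--         n_letters = len (w)
--         s         = 0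
--         e         = w [0]
--         morse_strings = []
--         for x in range(0,n_letters):
--             morse_string  = morse_input [s:e]
--             morse_strings.append (morse_string)
--         #    print (morse_strings)
--             if e == len (morse_input):
--                 break
--             if w [x + 1] == -1:
--                     e = len (morse_input)
--             else:
--                  e = w [x + 1]
--             s = w [x] + 1
--     return morse_strings
-- ===== SOURCE B (Python) =====
-- def wordparse (morse_input):
--     "parses morse input into morse strings"
--     words = []
--     cur = ''
--     for ch in morse_input:
--         if ch == '_':
--             words.append(cur)
--             cur = ''
--         else:
--             cur += ch
--     if not words:
--         print ("single word")
--         return [morse_input]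
--     words.append(cur)
--     return words
-- ===== Notes on version B (the rewrite author's own statement) =====
-- stated objective: simpler
-- what changed: Replaced the two-phase strategy (build a list of underscore indexes with repeated str.find, then slice between consecutive indexes in an index-juggling loop with break) by a single character-by-character scan that accumulates the current word and flushes it on each underscore; the no-underscore print branch is kept.
import Mathlib
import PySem

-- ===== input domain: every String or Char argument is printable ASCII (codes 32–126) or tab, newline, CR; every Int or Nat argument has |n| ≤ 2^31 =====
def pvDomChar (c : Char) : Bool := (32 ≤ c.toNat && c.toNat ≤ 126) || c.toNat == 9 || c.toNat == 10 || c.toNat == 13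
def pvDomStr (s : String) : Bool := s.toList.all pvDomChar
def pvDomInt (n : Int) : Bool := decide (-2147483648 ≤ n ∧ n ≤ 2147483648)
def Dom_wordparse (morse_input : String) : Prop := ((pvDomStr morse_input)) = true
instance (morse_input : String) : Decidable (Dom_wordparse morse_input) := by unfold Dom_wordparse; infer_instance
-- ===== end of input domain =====

-- B replaces A's two-phase index-table-then-slice strategy by a single accumulating scan (objective: simpler).
-- Both A and B print the same message on the no-underscore branch; the equivalence proved here is about the return value.

-- ===== PORT A =====
-- underscore: the 'while True' loop (x advances past each found '_'); the fuel only makes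
-- the recursion total — length+1 iterations always suffice, proved in go_spec below.
def underscoreGo (mi : String) (fuel : Nat) (x : Int) (arr : List Int) : List Int :=
  match fuel with
  | 0 => arr
  | fuel + 1 =>
    let i := PySem.Str.findFrom mi "_" x
    let arr2 := arr ++ [i]
    if i = -1 then arr2 else underscoreGo mi fuel (i + 1) arr2

def underscore (mi : String) : List Int :=
  underscoreGo mi (mi.toList.length + 1) 0 []

-- the 'for x in range(0, n_letters)' loop with its break; 'none' cases = Python's IndexError,
-- unreachable for w = underscore mi (the break fires first), kept only to make the port total.
def parseGo (mi : String) (w : List Int) (xs : List Int) (s e : Int) (acc : List String) : List String :=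
  match xs with
  | [] => acc
  | x :: rest =>
    let acc2 := acc ++ [PySem.Str.slice mi (some s) (some e)]
    if e = PySem.Str.len mi then acc2
    else
      match PySem.List.pyGet? w (x + 1), PySem.List.pyGet? w x with
      | some nxt, some wx =>
          parseGo mi w rest (wx + 1) (if nxt = -1 then PySem.Str.len mi else nxt) acc2
      | _, _ => acc2

def wordparse (morse_input : String) : List String :=
  let w := underscore morse_input
  match PySem.List.pyGet? w 0 with
  | none => []   -- unreachable: underscore always returns a nonempty list
  | some w0 =>
    if w0 = -1 then [morse_input]
    else parseGo morse_input w (PySem.List.pyRange 0 (w.length : Int)) 0 w0 []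

-- ===== PORT B =====
def wordparse_alt (morse_input : String) : List String :=
  let r := morse_input.toList.foldl
    (fun (st : List String × List Char) ch =>
      if ch = '_' then (st.1 ++ [String.ofList st.2], []) else (st.1, st.2 ++ [ch]))
    ([], [])
  if r.1 = [] then [morse_input] else r.1 ++ [String.ofList r.2]

-- ===== PRECONDITION & SPEC =====
def Spec_wordparse (morse_input : String) (out : List String) : Prop := out = wordparse_alt morse_input
instance (morse_input : String) (out : List String) : Decidable (Spec_wordparse morse_input out) := by unfold Spec_wordparse; infer_instance

-- ===== CLAIM (what is proved, stated in full; the proofs are below) =====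
def Claim_equal_wordparse : Prop := ∀ (morse_input : String), Dom_wordparse morse_input → Spec_wordparse morse_input (wordparse morse_input)

-- ===== LEMMAS AND PROOFS =====

-- the common specification: Python's s.split('_') as a structural recursion
def sp : List Char → List (List Char)
  | [] => [[]]
  | c :: cs =>
    if c = '_' then [] :: sp cs
    else (c :: (sp cs).headI) :: (sp cs).tail

theorem sp_ne_nil (t : List Char) : sp t ≠ [] := by
  cases t with
  | nil => simp [sp]
  | cons c cs => simp only [sp]; split <;> simp

theorem sp_no (t : List Char) (h : '_' ∉ t) : sp t = [t] := by
  induction t with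
  | nil => rfl
  | cons c cs ih =>
    simp only [List.mem_cons, not_or] at h
    simp [sp, ih h.2, Ne.symm h.1]

theorem sp_single (t w : List Char) (h : sp t = [w]) : w = t := by
  induction t generalizing w with
  | nil => simp [sp] at h; exact h
  | cons c cs ih =>
    simp only [sp] at h
    by_cases hc : c = '_'
    · rw [if_pos hc] at h
      exact absurd (List.cons.inj h).2 (sp_ne_nil cs)
    · rw [if_neg hc] at h
      have h1 := (List.cons.inj h).1
      have h2 := (List.cons.inj h).2
      rcases hsp : sp cs with _ | ⟨w', ws⟩
      · exact absurd hsp (sp_ne_nil cs)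
      · rw [hsp] at h1 h2
        simp only [List.headI_cons] at h1
        simp only [List.tail_cons] at h2
        have := ih w' (by rw [hsp, h2])
        rw [← h1, this]

-- first-word length
def tw (t : List Char) : Nat := (t.takeWhile (· ≠ '_')).length

theorem take_tw (t : List Char) : t.take (tw t) = t.takeWhile (· ≠ '_') :=
  ((List.prefix_iff_eq_take).mp (List.takeWhile_prefix _)).symm

theorem tw_cons_ne (c : Char) (cs : List Char) (hc : c ≠ '_') :
    tw (c :: cs) = tw cs + 1 := by
  unfold tw
  rw [List.takeWhile_cons, if_pos (by simp [hc])]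
  simp

theorem tw_cons_us (cs : List Char) : tw ('_' :: cs) = 0 := by
  unfold tw
  rw [List.takeWhile_cons, if_neg (by simp)]
  simp

theorem drop_tw_cons (t : List Char) (h : '_' ∈ t) :
    t.drop (tw t) = '_' :: t.drop (tw t + 1) := by
  induction t with
  | nil => simp at h
  | cons c cs ih =>
    by_cases hc : c = '_'
    · subst hc; rw [tw_cons_us]; simp
    · have hmem : '_' ∈ cs := by
        rcases List.mem_cons.mp h with h1 | h1
        · exact absurd h1.symm hc
        · exact h1
      rw [tw_cons_ne c cs hc, List.drop_succ_cons, List.drop_succ_cons]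
      exact ih hmem

theorem tw_lt (t : List Char) (h : '_' ∈ t) : tw t < t.length := by
  have h1 : t.drop (tw t) = '_' :: t.drop (tw t + 1) := drop_tw_cons t h
  have h2 := List.length_drop (l := t) (i := tw t)
  rw [h1] at h2
  simp at h2
  omega

theorem sp_decomp (t : List Char) (h : '_' ∈ t) :
    sp t = t.takeWhile (· ≠ '_') :: sp (t.drop (tw t + 1)) := by
  cases t with
  | nil => simp at h
  | cons c cs =>
    by_cases hc : c = '_'
    · subst hc
      rw [List.takeWhile_cons, if_neg (by simp), tw_cons_us]
      simp [sp]
    · have hmem : '_' ∈ cs := by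
        rcases List.mem_cons.mp h with h1 | h1
        · exact absurd h1.symm hc
        · exact h1
      rw [List.takeWhile_cons, if_pos (by simp [hc]), tw_cons_ne c cs hc]
      simp only [sp, if_neg hc, sp_decomp cs hmem]
      simp

-- positions of '_' in cs from index k on
def posF (cs : List Char) (k : Nat) : List Nat :=
  if h : '_' ∈ cs.drop k then
    (k + tw (cs.drop k)) :: posF cs (k + tw (cs.drop k) + 1)
  else []
termination_by cs.length - k
decreasing_by
  have h1 := tw_lt _ h
  have h2 := List.length_drop (l := cs) (i := k)
  have h3 : k < cs.length := by
    by_contra hk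
    simp [List.drop_eq_nil_of_le (by omega : cs.length ≤ k)] at h
  omega

theorem posF_head_lt (cs : List Char) (k q : Nat) (qs : List Nat)
    (h : posF cs k = q :: qs) : k ≤ q ∧ q < cs.length ∧ q = k + tw (cs.drop k) ∧
      qs = posF cs (q + 1) ∧ '_' ∈ cs.drop k := by
  rw [posF] at h
  split at h
  · rename_i hm
    have h1 := tw_lt _ hm
    have h2 := List.length_drop (l := cs) (i := k)
    have h3 : k < cs.length := by
      by_contra hk
      simp [List.drop_eq_nil_of_le (by omega : cs.length ≤ k)] at hm
    obtain ⟨rfl, rfl⟩ := List.cons.inj h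
    exact ⟨by omega, by omega, rfl, rfl, hm⟩
  · simp at h

theorem dw_eq (t : List Char) : t.dropWhile (· ≠ '_') = t.drop (tw t) := by
  induction t with
  | nil => rfl
  | cons c cs ih =>
    rw [List.dropWhile_cons]
    by_cases hc : c = '_'
    · subst hc; rw [if_neg (by simp), tw_cons_us]; rfl
    · rw [if_pos (by simp [hc]), tw_cons_ne c cs hc, List.drop_succ_cons]
      exact ih

theorem split_at_tw (t : List Char) (h : '_' ∈ t) :
    t = t.takeWhile (· ≠ '_') ++ ('_' :: t.drop (tw t + 1)) := by
  conv_lhs => rw [← List.takeWhile_append_dropWhile (p := (· ≠ '_')) (l := t)]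
  rw [dw_eq t, drop_tw_cons t h]

theorem count_takeWhile_zero (t : List Char) :
    (t.takeWhile (· ≠ '_')).count '_' = 0 := by
  rw [List.count_eq_zero]
  intro hmem
  have := List.mem_takeWhile_imp hmem
  simp at this

theorem count_step (cs : List Char) (k : Nat) (h : '_' ∈ cs.drop k) :
    (cs.drop (k + tw (cs.drop k) + 1)).count '_' + 1 = (cs.drop k).count '_' := by
  have hdd : (cs.drop k).drop (tw (cs.drop k) + 1) = cs.drop (k + tw (cs.drop k) + 1) := by
    rw [List.drop_drop]; congr 1
  conv_rhs => rw [split_at_tw (cs.drop k) h]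
  rw [List.count_append, count_takeWhile_zero, hdd]
  simp

-- find with a singleton needle
theorem find_go_underscore (t : List Char) (k : Nat) :
    PySem.Chars.find.go ['_'] t k = if '_' ∈ t then ((k + tw t : Nat) : Int) else -1 := by
  induction t generalizing k with
  | nil => simp [PySem.Chars.find.go]
  | cons c cs ih =>
    by_cases hc : c = '_'
    · subst hc
      rw [show PySem.Chars.find.go ['_'] ('_' :: cs) k = (k : Int) from by
        simp [PySem.Chars.find.go, List.isPrefixOf]]
      rw [if_pos (by simp), tw_cons_us]
      simp
    · have hpre : List.isPrefixOf ['_'] (c :: cs) = false := by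
        simp [List.isPrefixOf]
        intro h; exact absurd h.symm hc
      rw [show PySem.Chars.find.go ['_'] (c :: cs) k = PySem.Chars.find.go ['_'] cs (k + 1) from by
        simp [PySem.Chars.find.go, hpre]]
      rw [ih (k + 1), tw_cons_ne c cs hc]
      by_cases hm : '_' ∈ cs
      · rw [if_pos hm, if_pos (by simp [hm])]
        push_cast; ring
      · rw [if_neg hm, if_neg (by simp [hm, Ne.symm hc])]

theorem findU (cs : List Char) (k : Nat) (hk : k ≤ cs.length) :
    PySem.Chars.findFrom cs ['_'] (k : Int) none =
      if '_' ∈ cs.drop k then ((k + tw (cs.drop k) : Nat) : Int) else -1 := by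
  rw [PySem.Chars.findFrom_natCast cs ['_'] k hk]
  have : PySem.Chars.find (cs.drop k) ['_'] =
      if '_' ∈ cs.drop k then ((tw (cs.drop k) : Nat) : Int) else -1 := by
    simpa using find_go_underscore (cs.drop k) 0
  by_cases hm : '_' ∈ cs.drop k
  · rw [this, if_pos hm, if_pos hm,
      if_neg (show ¬((tw (cs.drop k) : Nat) : Int) = -1 by omega)]
    push_cast; ring
  · rw [this, if_neg hm, if_neg hm, if_pos rfl]

-- underscore returns exactly the position list followed by -1
theorem go_spec (mi : String) (fuel k : Nat) (arr : List Int)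
    (hk : k ≤ mi.toList.length) (hf : (mi.toList.drop k).count '_' < fuel) :
    underscoreGo mi fuel (k : Int) arr =
      arr ++ (posF mi.toList k).map (fun n => (n : Int)) ++ [-1] := by
  induction fuel generalizing k arr with
  | zero => omega
  | succ fuel ih =>
    simp only [underscoreGo]
    have hfind : PySem.Str.findFrom mi "_" (k : Int) =
        if '_' ∈ mi.toList.drop k then ((k + tw (mi.toList.drop k) : Nat) : Int) else -1 := by
      have : PySem.Str.findFrom mi "_" (k : Int) =
          PySem.Chars.findFrom mi.toList ['_'] (k : Int) none := rfl
      rw [this, findU mi.toList k hk]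
    by_cases hm : '_' ∈ mi.toList.drop k
    · rw [hfind, if_pos hm]
      have hne : ((k + tw (mi.toList.drop k) : Nat) : Int) ≠ -1 := by omega
      rw [if_neg hne]
      have h1 := tw_lt _ hm
      have h2 := List.length_drop (l := mi.toList) (i := k)
      have hcast : ((k + tw (mi.toList.drop k) : Nat) : Int) + 1 =
          ((k + tw (mi.toList.drop k) + 1 : Nat) : Int) := by push_cast; ring
      rw [hcast, ih (k + tw (mi.toList.drop k) + 1) _ (by omega)
        (by have := count_step mi.toList k hm; omega)]
      conv_rhs => rw [posF, dif_pos hm]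
      simp [List.append_assoc]
    · rw [hfind, if_neg hm, if_pos rfl]
      rw [posF, dif_neg hm]
      simp

theorem underscore_spec (mi : String) :
    underscore mi = (posF mi.toList 0).map (fun n => (n : Int)) ++ [-1] := by
  have := go_spec mi (mi.toList.length + 1) 0 [] (by omega)
    (by have := List.count_le_length (l := mi.toList.drop 0) (a := '_'); simp at this ⊢; omega)
  simpa [underscore] using this

-- the slicing loop emits exactly the words of the suffix starting at k
theorem parse_inv (mi : String) (L : Nat) :
    ∀ (k : Nat) (pre : List Nat) (acc : List String),
    k ≤ mi.toList.length → (posF mi.toList k).length = L →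
    posF mi.toList 0 = pre ++ posF mi.toList k →
    parseGo mi ((posF mi.toList 0).map (fun n => (n : Int)) ++ [-1])
      (PySem.List.pyRange (pre.length : Int) ((((posF mi.toList 0).map (fun n => (n : Int)) ++ [-1]).length : Nat) : Int))
      (k : Int)
      (match posF mi.toList k with | [] => (mi.toList.length : Int) | q :: _ => (q : Int))
      acc
    = acc ++ (sp (mi.toList.drop k)).map String.ofList := by
  induction L with
  | zero =>
    intro k pre acc hk hlen hpre
    have hnil : posF mi.toList k = [] := List.eq_nil_of_length_eq_zero hlen
    rw [hnil] at hpre ⊢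
    have hj : pre.length < ((posF mi.toList 0).map (fun n => (n : Int)) ++ [-1]).length := by
      simp [hpre]
    rw [PySem.List.pyRange_one_cons (by exact_mod_cast hj)]
    simp only [parseGo]
    rw [if_pos (by simp [PySem.Str.len])]
    have hnm : '_' ∉ mi.toList.drop k := by
      intro hm; rw [posF, dif_pos hm] at hnil; simp at hnil
    rw [sp_no _ hnm]
    have hslice : PySem.Str.slice mi (some (k : Int)) (some (mi.toList.length : Int)) =
        String.ofList (mi.toList.drop k) := by
      simp only [PySem.Str.slice, PySem.Chars.slice, PySem.List.slice_natCast]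
      rw [List.take_of_length_le (by simp [List.length_drop])]
    rw [hslice]
    simp
  | succ L ih =>
    intro k pre acc hk hlen hpre
    rcases hq : posF mi.toList k with _ | ⟨q, qs⟩
    · rw [hq] at hlen; simp at hlen
    obtain ⟨hkq, hqlt, hqeq, hqs, hm⟩ := posF_head_lt mi.toList k q qs hq
    rw [hq] at hpre hlen
    have hlen' : (posF mi.toList (q + 1)).length = L := by
      rw [← hqs]; simpa using hlen
    have hj : pre.length < ((posF mi.toList 0).map (fun n => (n : Int)) ++ [-1]).length := by
      simp [hpre]
    rw [PySem.List.pyRange_one_cons (by exact_mod_cast hj)]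
    simp only [parseGo]
    have hlenmi : PySem.Str.len mi = ((mi.toList.length : Nat) : Int) := rfl
    rw [if_neg (by rw [hlenmi]; omega)]
    have hw : (posF mi.toList 0).map (fun n => (n : Int)) ++ [-1] =
        pre.map (fun n => (n : Int)) ++ ((q : Int) :: (qs.map (fun n => (n : Int)) ++ [-1])) := by
      rw [hpre]; simp
    have hget0 : PySem.List.pyGet? ((posF mi.toList 0).map (fun n => (n : Int)) ++ [-1]) ((pre.length : Int)) =
        some (q : Int) := by
      rw [PySem.List.pyGet?_natCast, hw]
      rw [List.getElem?_append_right (by simp)]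
      simp
    have hcast1 : ((pre.length : Int) + 1) = ((pre.length + 1 : Nat) : Int) := by push_cast; ring
    have hslice : PySem.Str.slice mi (some (k : Int)) (some (q : Int)) =
        String.ofList ((mi.toList.drop k).takeWhile (· ≠ '_')) := by
      simp only [PySem.Str.slice, PySem.Chars.slice, PySem.List.slice_natCast]
      have hd : q - k = tw (mi.toList.drop k) := by omega
      rw [← take_tw, ← hd]
    have hrange : ((pre.length : Int) + 1) = (((pre ++ [q]).length : Nat) : Int) := by
      simp
    have hdq : mi.toList.drop (q + 1) = (mi.toList.drop k).drop (tw (mi.toList.drop k) + 1) := by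
      rw [List.drop_drop]; congr 1; omega
    have hnext : ((q : Int) + 1) = ((q + 1 : Nat) : Int) := by push_cast; ring
    rcases qs with _ | ⟨q', qs'⟩
    · have hget1 : PySem.List.pyGet? ((posF mi.toList 0).map (fun n => (n : Int)) ++ [-1]) ((pre.length : Int) + 1) =
          some (-1) := by
        rw [hcast1, PySem.List.pyGet?_natCast, hw]
        rw [List.getElem?_append_right (by simp)]
        simp
      rw [hget1, hget0]
      simp only []
      rw [if_pos trivial, hnext, hrange]
      rw [show PySem.Str.len mi =
          (match posF mi.toList (q + 1) with
            | [] => ((mi.toList.length : Nat) : Int)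
            | p :: _ => ((p : Nat) : Int)) from by rw [← hqs]; exact hlenmi]
      rw [ih (q + 1) (pre ++ [q]) _ (by omega) hlen' (by rw [← hqs]; simpa using hpre)]
      rw [sp_decomp _ hm, ← hdq, hslice]
      simp
    · have hget1 : PySem.List.pyGet? ((posF mi.toList 0).map (fun n => (n : Int)) ++ [-1]) ((pre.length : Int) + 1) =
          some ((q' : Nat) : Int) := by
        rw [hcast1, PySem.List.pyGet?_natCast, hw]
        rw [List.getElem?_append_right (by simp)]
        simp
      rw [hget1, hget0]
      simp only []
      rw [if_neg (by omega), hnext, hrange]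
      rw [show ((q' : Nat) : Int) =
          (match posF mi.toList (q + 1) with
            | [] => ((mi.toList.length : Nat) : Int)
            | p :: _ => ((p : Nat) : Int)) from by rw [← hqs]]
      rw [ih (q + 1) (pre ++ [q]) _ (by omega) hlen' (by rw [← hqs]; simpa using hpre)]
      rw [sp_decomp _ hm, ← hdq, hslice]
      simp

-- B equals the common specification
theorem B_inv (t : List Char) :
    ∀ (ws : List String) (cur : List Char),
    t.foldl (fun (st : List String × List Char) ch =>
        if ch = '_' then (st.1 ++ [String.ofList st.2], []) else (st.1, st.2 ++ [ch])) (ws, cur)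
    = (ws ++ ((match sp t with | [] => [cur] | w :: rest => (cur ++ w) :: rest).dropLast).map String.ofList,
       (match sp t with | [] => [cur] | w :: rest => (cur ++ w) :: rest).getLastD []) := by
  induction t with
  | nil => intro ws cur; simp [sp]
  | cons c cs ih =>
    intro ws cur
    rcases hsp : sp cs with _ | ⟨w, rest⟩
    · exact absurd hsp (sp_ne_nil cs)
    by_cases hc : c = '_'
    · subst hc
      simp only [List.foldl_cons, reduceIte]
      rw [ih (ws ++ [String.ofList cur]) []]
      simp only [sp, reduceIte, hsp]
      have hne : (w :: rest) ≠ [] := by simp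
      simp [List.dropLast_cons_of_ne_nil hne, List.append_assoc]
    · simp only [List.foldl_cons, if_neg hc]
      rw [ih ws (cur ++ [c])]
      simp only [sp, if_neg hc, hsp]
      simp [List.append_assoc]

theorem map_last (l : List (List Char)) (h : l ≠ []) :
    (l.map String.ofList).dropLast ++ [String.ofList (l.getLast?.getD [])] = l.map String.ofList := by
  induction l with
  | nil => simp at h
  | cons a t ih =>
    cases t with
    | nil => simp
    | cons b t' =>
      rw [List.map_cons, List.dropLast_cons_of_ne_nil (by simp), List.cons_append]
      congr 1
      rw [List.getLast?_cons_cons]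
      exact ih (by simp)

theorem B_eq (mi : String) : wordparse_alt mi = (sp mi.toList).map String.ofList := by
  unfold wordparse_alt
  rw [B_inv mi.toList [] []]
  rcases hsp : sp mi.toList with _ | ⟨w, rest⟩
  · exact absurd hsp (sp_ne_nil mi.toList)
  simp only [List.nil_append]
  rcases rest with _ | ⟨w2, rest'⟩
  · have := sp_single mi.toList w hsp
    subst this
    simp
  · have hne : (w2 :: rest') ≠ [] := by simp
    simp [List.dropLast_cons_of_ne_nil hne]
    simpa using map_last (w2 :: rest') hne

-- A equals the common specification
theorem A_eq (mi : String) : wordparse mi = (sp mi.toList).map String.ofList := by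
  unfold wordparse
  rw [underscore_spec mi]
  rcases hp : posF mi.toList 0 with _ | ⟨q, qs⟩
  · have hget : PySem.List.pyGet? (([] : List Nat).map (fun n => (n : Int)) ++ [-1]) 0 = some (-1) := by
      simp [PySem.List.pyGet?, PySem.List.pyIdx?]
    simp only [hget, reduceIte]
    have hnm : '_' ∉ mi.toList := by
      intro hm
      rw [posF] at hp
      rw [dif_pos (by simpa using hm)] at hp
      simp at hp
    rw [sp_no _ hnm]
    simp
  · obtain ⟨_, hqlt, _, _, _⟩ := posF_head_lt mi.toList 0 q qs hp
    have hget : PySem.List.pyGet? ((q :: qs).map (fun n => (n : Int)) ++ [-1]) 0 = some (q : Int) := by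
      simp [PySem.List.pyGet?, PySem.List.pyIdx?]
      rw [if_pos (by positivity)]
      simp
    simp only [hget]
    rw [if_neg (show ¬((q : Nat) : Int) = -1 by omega)]
    have := parse_inv mi (posF mi.toList 0).length 0 [] []
      (by omega) rfl (by simp)
    rw [hp] at this
    simpa using this

-- ===== VERDICT (by name: the statement is the Claim_ definition above) =====
theorem wordparse_spec : Claim_equal_wordparse := by
  intro mi _
  unfold Spec_wordparse
  rw [A_eq, B_eq]
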